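-- pv_equiv track=rewrite | github.com/SOHAM240104/MADS | Seq2Seq_Attention_ut/dataset_new.py | tokenize_bash
-- ===== SOURCE A (Python) =====
-- def tokenize_bash(text):
--     """Simple bash tokenization - split on spaces and handle special characters"""
--     # Handle non-string inputs
--     if not isinstance(text, str):
--         text = str(text) if text is not None else ""
--
--     # Basic tokenization for bash commands
--     tokens = []
--     current_token = ""
--     in_quotes = False
--
--     for char in text:
--         if char in ['"', "'"]:
--             in_quotes = not in_quotes
--             current_token += char
--         elif char == ' ' and not in_quotes:
--             if current_token:
--                 tokens.append(current_token.lower())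
--                 current_token = ""
--         else:
--             current_token += char
--
--     if current_token:
--         tokens.append(current_token.lower())
--
--     return tokens
-- ===== SOURCE B (Python) =====
-- def tokenize_bash(text):
--     """Simple bash tokenization - split on spaces and handle special characters"""
--     if not isinstance(text, str):
--         text = str(text) if text is not None else ""
--
--     def qparity(piece):
--         n = 0
--         for ch in piece:
--             if ch in '"\'':
--                 n += 1
--         return n % 2 == 1
--
--     pieces = text.split(' ')
--     tokens = []
--     cur = pieces[0]
--     inq = qparity(cur)
--     for piece in pieces[1:]:
--         if inq:
--             cur += ' ' + piece
--         else:
--             if cur: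
--                 tokens.append(cur.lower())
--             cur = piece
--         inq ^= qparity(piece)
--     if cur:
--         tokens.append(cur.lower())
--     return tokens
-- ===== Notes on version B (the rewrite author's own statement) =====
-- stated objective: alternative
-- what changed: Replaces the char-by-char state machine with a split-on-space pass that merges pieces back together using a running quote-parity, appending lowercased tokens at piece boundaries.
import Mathlib
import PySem

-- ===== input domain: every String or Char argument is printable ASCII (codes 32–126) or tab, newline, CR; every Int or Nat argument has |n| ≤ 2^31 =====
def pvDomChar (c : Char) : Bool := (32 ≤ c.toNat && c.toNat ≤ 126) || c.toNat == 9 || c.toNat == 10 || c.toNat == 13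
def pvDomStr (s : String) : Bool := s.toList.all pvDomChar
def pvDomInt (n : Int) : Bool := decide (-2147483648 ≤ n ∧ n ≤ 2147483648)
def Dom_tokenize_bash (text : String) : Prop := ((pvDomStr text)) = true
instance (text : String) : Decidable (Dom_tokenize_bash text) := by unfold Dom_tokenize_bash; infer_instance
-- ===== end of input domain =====

-- B replaces A's char-by-char quote state machine with a split-on-space then merge-by-quote-parity pass (objective: alternative).

-- ===== PORT A =====
-- one step of A's for-loop; state = (tokens, current_token, in_quotes)
def tbStepA (st : List String × List Char × Bool) (c : Char) : List String × List Char × Bool :=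
  if c == '"' || c == '\'' then (st.1, st.2.1 ++ [c], !st.2.2)
  else if c == ' ' && !st.2.2 then
    (if st.2.1 ≠ [] then (st.1 ++ [String.ofList (PySem.Chars.lower st.2.1)], [], st.2.2)
     else (st.1, st.2.1, st.2.2))
  else (st.1, st.2.1 ++ [c], st.2.2)

def tokenize_bash (text : String) : List String :=
  let st := text.toList.foldl tbStepA ([], [], false)
  if st.2.1 ≠ [] then st.1 ++ [String.ofList (PySem.Chars.lower st.2.1)] else st.1

-- ===== PORT B =====
-- helper qparity of Source B: count quote chars by loop, test oddness ('ch in "\'"' = char equals one of the two quotes)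
def tbQparity (p : List Char) : Bool :=
  PySem.Int.mod (p.foldl (fun n c => if c == '"' || c == '\'' then n + 1 else n) (0 : Int)) 2 == 1

-- one step of B's for-loop over pieces[1:]; state = (tokens, cur, inq)
def tbStepB (st : List String × List Char × Bool) (p : List Char) : List String × List Char × Bool :=
  let st' :=
    if st.2.2 then (st.1, st.2.1 ++ [' '] ++ p, st.2.2)
    else if st.2.1 ≠ [] then (st.1 ++ [String.ofList (PySem.Chars.lower st.2.1)], p, st.2.2)
    else (st.1, p, st.2.2)
  (st'.1, st'.2.1, xor st'.2.2 (tbQparity p))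

def tokenize_bash_alt (text : String) : List String :=
  match PySem.Chars.splitOn text.toList [' '] with
  | [] => []          -- unreachable: str.split(' ') always returns at least one piece
  | p0 :: rest =>
    let st := rest.foldl tbStepB ([], p0, tbQparity p0)
    if st.2.1 ≠ [] then st.1 ++ [String.ofList (PySem.Chars.lower st.2.1)] else st.1

-- ===== PRECONDITION & SPEC =====
def Spec_tokenize_bash (text : String) (out : List String) : Prop := out = tokenize_bash_alt text
instance (text : String) (out : List String) : Decidable (Spec_tokenize_bash text out) := by unfold Spec_tokenize_bash; infer_instance

-- ===== CLAIM (what is proved, stated in full; the proofs are below) =====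
def Claim_equal_tokenize_bash : Prop := ∀ (text : String), Dom_tokenize_bash text → Spec_tokenize_bash text (tokenize_bash text)

-- ===== LEMMAS AND PROOFS =====

-- proof-side split on ' '
def tbSplit : List Char → List (List Char)
  | [] => [[]]
  | c :: rest =>
    if c = ' ' then [] :: tbSplit rest
    else match tbSplit rest with
      | p :: ps => (c :: p) :: ps
      | [] => [[c]]

-- proof-side quote parity
def tbQpar (p : List Char) : Bool := p.countP (fun c => c == '"' || c == '\'') % 2 == 1

theorem tbQparity_eq (p : List Char) : tbQparity p = tbQpar p := by
  unfold tbQparity tbQpar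
  rw [PySem.List.foldl_if_add_one]
  have h : PySem.Int.mod ((0:Int) + (p.countP fun c => c == '"' || c == '\'')) 2
      = (((p.countP fun c => c == '"' || c == '\'') % 2 : Nat) : Int) := by
    unfold PySem.Int.mod
    rw [Int.fmod_eq_emod]
    simp
  rw [h]
  rcases Nat.mod_two_eq_zero_or_one (p.countP fun c => c == '"' || c == '\'') with h2 | h2 <;>
    simp [h2]

theorem tbSplit_ne_nil (l : List Char) : tbSplit l ≠ [] := by
  induction l with
  | nil => simp [tbSplit]
  | cons c rest ih =>
    simp only [tbSplit]
    split
    · simp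
    · split <;> simp

theorem tbSplit_no_space (l : List Char) : ∀ p ∈ tbSplit l, ' ' ∉ p := by
  induction l with
  | nil => simp [tbSplit]
  | cons c rest ih =>
    simp only [tbSplit]
    split
    · intro p hp
      rcases List.mem_cons.mp hp with h | h
      · simp [h]
      · exact ih p h
    · rename_i hc
      rcases h : tbSplit rest with _ | ⟨p, ps⟩
      · exact absurd h (tbSplit_ne_nil rest)
      · intro q hq
        rcases List.mem_cons.mp hq with hq | hq
        · subst hq
          have hp := ih p (by rw [h]; exact List.mem_cons_self)
          intro hmem
          rcases List.mem_cons.mp hmem with h1 | h1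
          · exact hc h1.symm
          · exact hp h1
        · exact ih q (by rw [h]; exact List.mem_cons_of_mem _ hq)

-- glue: the characters contributed by the pieces after the first
def tbGlue (ps : List (List Char)) : List Char := ps.flatMap (fun p => ' ' :: p)

theorem tbSplit_intercalate (l : List Char) :
    ∀ p ps, tbSplit l = p :: ps → p ++ tbGlue ps = l := by
  induction l with
  | nil => intro p ps h; simp [tbSplit] at h; simp [h.1, h.2, tbGlue]
  | cons c rest ih =>
    intro p ps h
    simp only [tbSplit] at h
    by_cases hc : c = ' '
    · subst hc
      rw [if_pos rfl] at h
      cases h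
      rcases hr : tbSplit rest with _ | ⟨q, qs⟩
      · exact absurd hr (tbSplit_ne_nil rest)
      · simpa [tbGlue] using ih q qs hr
    · rw [if_neg hc] at h
      rcases hr : tbSplit rest with _ | ⟨q, qs⟩
      · exact absurd hr (tbSplit_ne_nil rest)
      · rw [hr] at h
        have h1 : p = c :: q := (List.cons_eq_cons.mp h).1.symm
        have h2 : ps = qs := (List.cons_eq_cons.mp h).2.symm
        rw [h1, h2]
        simpa using congrArg (c :: ·) (ih q qs hr)

-- PySem.Chars.splitOn.go on the single-space separator computes tbSplit
theorem tbGo_eq (fuel : Nat) (l cur : List Char) (acc : List (List Char))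
    (hf : l.length ≤ fuel) :
    PySem.Chars.splitOn.go [' '] fuel l cur acc =
      acc.reverse ++
        (match tbSplit l with
         | p :: ps => (cur.reverse ++ p) :: ps
         | [] => []) := by
  induction fuel generalizing l cur acc with
  | zero =>
    have : l = [] := by cases l <;> simp_all
    subst this
    simp [PySem.Chars.splitOn.go, tbSplit]
  | succ fuel ih =>
    cases l with
    | nil => simp [PySem.Chars.splitOn.go, tbSplit]
    | cons c rest =>
      simp only [PySem.Chars.splitOn.go]
      by_cases hc : c = ' '
      · subst hc
        rw [if_pos (by simp [List.isPrefixOf])]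
        have hdrop : List.drop [' '].length (' ' :: rest) = rest := by simp
        rw [hdrop, ih rest [] (cur.reverse :: acc) (by simp at hf ⊢; omega)]
        simp only [tbSplit]
        rcases h : tbSplit rest with _ | ⟨p, ps⟩
        · exact absurd h (tbSplit_ne_nil rest)
        · simp
      · rw [if_neg (by simp [List.isPrefixOf, List.isPrefixOf]; intro h; exact hc h.symm)]
        rw [ih rest (c :: cur) acc (by simp at hf ⊢; omega)]
        simp only [tbSplit, if_neg hc]
        rcases h : tbSplit rest with _ | ⟨p, ps⟩
        · exact absurd h (tbSplit_ne_nil rest)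
        · simp

theorem tbSplitOn_eq (l : List Char) : PySem.Chars.splitOn l [' '] = tbSplit l := by
  unfold PySem.Chars.splitOn
  rw [tbGo_eq _ _ _ _ (by omega)]
  rcases h : tbSplit l with _ | ⟨p, ps⟩
  · exact absurd h (tbSplit_ne_nil l)
  · simp

-- A's fold over a space-free piece: append it to cur and flip parity by its quote count
theorem tbFoldA_piece (p : List Char) :
    ' ' ∉ p → ∀ (toks : List String) (cur : List Char) (inq : Bool),
    p.foldl tbStepA (toks, cur, inq) = (toks, cur ++ p, xor inq (tbQpar p)) := by
  induction p with
  | nil => intro _ toks cur inq; simp [tbQpar]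
  | cons c rest ih =>
    intro hp toks cur inq
    have hc : c ≠ ' ' := fun h => hp (h ▸ List.mem_cons_self)
    have hrest : ' ' ∉ rest := fun h => hp (List.mem_cons_of_mem _ h)
    have hflip : ∀ n : Nat, (((n + 1) % 2 == 1) : Bool) = !(n % 2 == 1) := by
      intro n
      rcases Nat.mod_two_eq_zero_or_one n with h | h <;> simp [Nat.add_mod, h]
    by_cases hq : c = '"' ∨ c = '\''
    · have hq2 : (c == '"' || c == '\'') = true := by
        rcases hq with h | h <;> simp [h]
      have hstep : tbStepA (toks, cur, inq) c = (toks, cur ++ [c], !inq) := by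
        simp [tbStepA, hq2]
      have hpar : tbQpar (c :: rest) = !(tbQpar rest) := by
        simp only [tbQpar, List.countP_cons, hq2, if_pos]
        exact hflip _
      rw [List.foldl_cons, hstep, ih hrest, hpar]
      cases inq <;> cases tbQpar rest <;> simp
    · have hq2 : (c == '"' || c == '\'') = false := by
        simp only [Bool.or_eq_false_iff, beq_eq_false_iff_ne]
        exact ⟨fun h => hq (Or.inl h), fun h => hq (Or.inr h)⟩
      have hstep : tbStepA (toks, cur, inq) c = (toks, cur ++ [c], inq) := by
        simp [tbStepA, hq2, hc]
      have hpar : tbQpar (c :: rest) = tbQpar rest := by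
        simp [tbQpar, hq2]
      rw [List.foldl_cons, hstep, ih hrest, hpar]
      simp

-- the common finishing step
def tbFinish (st : List String × List Char × Bool) : List String :=
  if st.2.1 ≠ [] then st.1 ++ [String.ofList (PySem.Chars.lower st.2.1)] else st.1

-- main coupling: A over the glued chars = B over the remaining pieces, from equal states
theorem tbMain (rest : List (List Char)) :
    (∀ p ∈ rest, ' ' ∉ p) → ∀ (toks : List String) (cur : List Char) (inq : Bool),
    tbFinish ((tbGlue rest).foldl tbStepA (toks, cur, inq)) =
      tbFinish (rest.foldl tbStepB (toks, cur, inq)) := by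
  induction rest with
  | nil => intro _ toks cur inq; simp [tbGlue]
  | cons p rest' ih =>
    intro hrest toks cur inq
    have hp : ' ' ∉ p := hrest p List.mem_cons_self
    have hrest' : ∀ q ∈ rest', ' ' ∉ q := fun q hq => hrest q (List.mem_cons_of_mem _ hq)
    have hglue : tbGlue (p :: rest') = ' ' :: (p ++ tbGlue rest') := by simp [tbGlue]
    rw [hglue]
    cases inq with
    | true =>
      have hsp : tbStepA (toks, cur, true) ' ' = (toks, cur ++ [' '], true) := by
        simp [tbStepA]
      have hb : tbStepB (toks, cur, true) p = (toks, cur ++ [' '] ++ p, xor true (tbQpar p)) := by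
        simp [tbStepB, tbQparity_eq]
      rw [List.foldl_cons, hsp, List.foldl_append, tbFoldA_piece p hp,
        List.foldl_cons, hb]
      simpa using ih hrest' toks (cur ++ [' '] ++ p) (xor true (tbQpar p))
    | false =>
      by_cases hcur : cur = []
      · subst hcur
        have hsp : tbStepA (toks, [], false) ' ' = (toks, [], false) := by simp [tbStepA]
        have hb : tbStepB (toks, [], false) p = (toks, p, xor false (tbQpar p)) := by
          simp [tbStepB, tbQparity_eq]
        rw [List.foldl_cons, hsp, List.foldl_append, tbFoldA_piece p hp,
          List.foldl_cons, hb]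
        simpa using ih hrest' toks p (xor false (tbQpar p))
      · have hsp : tbStepA (toks, cur, false) ' ' =
            (toks ++ [String.ofList (PySem.Chars.lower cur)], [], false) := by
          simp [tbStepA, hcur]
        have hb : tbStepB (toks, cur, false) p =
            (toks ++ [String.ofList (PySem.Chars.lower cur)], p, xor false (tbQpar p)) := by
          simp [tbStepB, tbQparity_eq, hcur]
        rw [List.foldl_cons, hsp, List.foldl_append, tbFoldA_piece p hp,
          List.foldl_cons, hb]
        simpa using ih hrest' _ p (xor false (tbQpar p))

-- ===== VERDICT (by name: the statement is the Claim_ definition above) =====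
theorem tokenize_bash_spec : Claim_equal_tokenize_bash := by
  intro text _
  show tokenize_bash text = tokenize_bash_alt text
  unfold tokenize_bash tokenize_bash_alt
  rw [tbSplitOn_eq]
  rcases h : tbSplit text.toList with _ | ⟨p0, rest⟩
  · exact absurd h (tbSplit_ne_nil text.toList)
  · have hdecomp : text.toList = p0 ++ tbGlue rest :=
      (tbSplit_intercalate text.toList p0 rest h).symm
    have hp0 : ' ' ∉ p0 := tbSplit_no_space text.toList p0 (by rw [h]; exact List.mem_cons_self)
    have hrest : ∀ q ∈ rest, ' ' ∉ q := fun q hq =>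
      tbSplit_no_space text.toList q (by rw [h]; exact List.mem_cons_of_mem _ hq)
    show tbFinish (text.toList.foldl tbStepA ([], [], false)) =
      tbFinish (rest.foldl tbStepB ([], p0, tbQparity p0))
    rw [hdecomp, List.foldl_append, tbFoldA_piece p0 hp0, tbQparity_eq]
    simpa using tbMain rest hrest [] p0 (xor false (tbQpar p0))
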